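-- pv_equiv track=rewrite | github.com/bengeek06/basic-io-api-waterfall | app/resources/import_mermaid.py | _parse_mindmap
-- ===== SOURCE A (Python) =====
-- from typing import Any, Dict, List, Optional, Tuple
--
-- def _extract_mindmap_label(label: str) -> Optional[str]:
--     """Extract label from mindmap node syntax.
--
--     Args:
--         label: Raw label text
--
--     Returns:
--         Extracted label or None if empty
--     """
--     # Extract label from root((Label)) or just Label
--     if label.startswith("root((") and label.endswith("))"):
--         label = label[6:-2]  # Remove root(( and ))
--     elif label.startswith("((") and label.endswith("))"):
--         label = label[2:-2]
--
--     return label if label else None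
--
-- def _parse_mindmap(lines: List[str]) -> List[Dict[str, Any]]:
--     """Parse a Mermaid mindmap diagram.
--
--     Args:
--         lines: List of lines from the diagram
--
--     Returns:
--         List of records extracted from the diagram
--     """
--     records = []
--     stack = []  # Stack to track parent hierarchy
--
--     for line in lines:
--         # Skip metadata and empty lines
--         if (
--             line.startswith("%%")
--             or not line.strip()
--             or line.strip() == "mindmap"
--         ):
--             continue
--
--         # Calculate indentation level
--         indent = len(line) - len(line.lstrip())
--         label = _extract_mindmap_label(line.strip())
--
--         # Skip empty labels
--         if not label:
--             continue
--
--         # Generate ID from label (simple approach)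
--         record_id = f"node-{len(records) + 1}"
--         record = {"id": record_id, "name": label}
--
--         # Determine parent based on indentation
--         # Pop stack until we find the right parent level
--         while stack and stack[-1][0] >= indent:
--             stack.pop()
--
--         if stack:
--             _, parent_id = stack[-1]
--             record["parent_id"] = parent_id
--
--         records.append(record)
--         stack.append((indent, record_id))
--
--     return records
-- ===== SOURCE B (Python) =====
-- from typing import Any, Dict, List, Optional, Tuple
--
--
-- def _extract_mindmap_label(label: str) -> Optional[str]:
--     if label.startswith("root((") and label.endswith("))"):
--         label = label[6:-2]
--     elif label.startswith("((") and label.endswith("))"):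
--         label = label[2:-2]
--     return label if label else None
--
--
-- def _accept(line: str) -> Optional[Tuple[int, str]]:
--     """Phase 1 filter: indent and extracted label of an accepted line, else None."""
--     stripped = line.strip()
--     if line.startswith("%%") or not stripped or stripped == "mindmap":
--         return None
--     label = _extract_mindmap_label(stripped)
--     if not label:
--         return None
--     return (len(line) - len(line.lstrip()), label)
--
--
-- def _parent_indices(indents: List[int]) -> List[Optional[int]]:
--     """Phase 2a: for each position, the nearest previous index with strictly smaller
--     indent (classic nearest-smaller-value pass), else None."""
--     parents: List[Optional[int]] = []
--     stack: List[Tuple[int, int]] = []  # (index, indent), indents strictly increasing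
--     for i, ind in enumerate(indents):
--         while stack and stack[-1][1] >= ind:
--             stack.pop()
--         parents.append(stack[-1][0] if stack else None)
--         stack.append((i, ind))
--     return parents
--
--
-- def _parse_mindmap(lines: List[str]) -> List[Dict[str, Any]]:
--     """Two-phase: filter lines to (indent, label) items, link parents by index, emit records."""
--     items = [p for p in map(_accept, lines) if p is not None]
--     parents = _parent_indices([ind for ind, _ in items])
--     return [
--         {"id": f"node-{i + 1}", "name": lab} if p is None
--         else {"id": f"node-{i + 1}", "name": lab, "parent_id": f"node-{p + 1}"}
--         for i, ((ind, lab), p) in enumerate(zip(items, parents))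
--     ]
-- ===== Notes on version B (the rewrite author's own statement) =====
-- stated objective: alternative
-- what changed: replaces A's single interleaved pass with a destructive (indent, id) parent stack by a three-stage pipeline: filter lines into (indent, label) items, compute all parent links at once with a nearest-smaller-value index pass over the indent sequence, then emit the records from items zipped with their parent indices
import Mathlib
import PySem

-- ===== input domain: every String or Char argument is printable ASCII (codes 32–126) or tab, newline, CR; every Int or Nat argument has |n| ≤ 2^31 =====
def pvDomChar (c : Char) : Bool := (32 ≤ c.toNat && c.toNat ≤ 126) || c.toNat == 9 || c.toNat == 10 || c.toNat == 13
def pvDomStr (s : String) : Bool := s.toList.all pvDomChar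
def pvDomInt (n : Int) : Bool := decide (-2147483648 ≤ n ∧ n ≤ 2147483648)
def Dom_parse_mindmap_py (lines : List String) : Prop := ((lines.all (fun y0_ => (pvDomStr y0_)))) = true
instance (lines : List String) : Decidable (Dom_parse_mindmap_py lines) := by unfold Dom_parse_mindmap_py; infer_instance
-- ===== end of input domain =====

-- B replaces A's single pass with a destructive parent stack by a three-stage pipeline:
-- filter the lines to (indent, label) items, compute every parent index at once with a
-- nearest-smaller-value pass over the indent sequence, then emit the records; same output.

-- ===== shared helpers (identical expressions in both Pythons) =====
-- _extract_mindmap_label (defined identically in both Pythons)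
def extract_label_py (label : String) : Option String :=
  let label :=
    if PySem.Str.startswith label "root((" && PySem.Str.endswith label "))" then
      PySem.Str.slice label (some 6) (some (-2))
    else if PySem.Str.startswith label "((" && PySem.Str.endswith label "))" then
      PySem.Str.slice label (some 2) (some (-2))
    else label
  if label = "" then none else some label

-- line.startswith("%%") or not line.strip() or line.strip() == "mindmap"
def pmSkip (line : String) : Bool :=
  PySem.Str.startswith line "%%" || PySem.Str.strip line = "" || PySem.Str.strip line = "mindmap"

-- indent = len(line) - len(line.lstrip())
def pmIndent (line : String) : Int :=
  (PySem.Str.len line : Int) - (PySem.Str.len (PySem.Str.lstrip line) : Int)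

-- ===== PORT A =====
-- record_id = f"node-{len(records) + 1}"
def pmRecId (n : Nat) : String := "node-" ++ PySem.Int.toStr ((n : Int) + 1)

-- {"id": …, "name": …} then record["parent_id"] = … when the popped stack is nonempty
def pmRecord (rid label : String) (parent : Option (Int × String)) : List (String × String) :=
  match parent with
  | none => [("id", rid), ("name", label)]
  | some (_, pid) => [("id", rid), ("name", label), ("parent_id", pid)]

-- 'while stack and stack[-1][0] >= indent: stack.pop()' (stack top at list head)
def pmPop (stack : List (Int × String)) (indent : Int) : List (Int × String) :=
  match stack with
  | [] => []
  | (i, x) :: rest => if indent ≤ i then pmPop rest indent else (i, x) :: rest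

-- the body of A's for-loop; 'if stack: _, parent_id = stack[-1]' is the head? of the popped stack
def pmStepA (st : List (List (String × String)) × List (Int × String)) (line : String) :
    List (List (String × String)) × List (Int × String) :=
  if pmSkip line then st
  else
    (extract_label_py (PySem.Str.strip line)).elim st (fun label =>
      let indent := pmIndent line
      let record_id := pmRecId st.1.length
      let stack' := pmPop st.2 indent
      (st.1 ++ [pmRecord record_id label stack'.head?], (indent, record_id) :: stack'))

def parse_mindmap_py (lines : List String) : List (List (String × String)) :=
  (lines.foldl pmStepA ([], [])).1

-- ===== PORT B =====
-- f"node-{i + 1}" from an index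
def pmNodeId (i : Int) : String := "node-" ++ PySem.Int.toStr (i + 1)

-- stage 1: _accept — indent and extracted label of an accepted line, else None
def pmAccept (line : String) : Option (Int × String) :=
  if pmSkip line then none
  else (extract_label_py (PySem.Str.strip line)).map (fun label => (pmIndent line, label))

-- stage 2: _parent_indices — 'while stack and stack[-1][1] >= ind: stack.pop()' (top at head)
def pmNsvPop (stack : List (Int × Int)) (ind : Int) : List (Int × Int) :=
  match stack with
  | [] => []
  | (j, pj) :: rest => if ind ≤ pj then pmNsvPop rest ind else (j, pj) :: rest

-- the body of _parent_indices' for-loop over enumerate(indents)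
def pmNsvStep (st : List (Option Int) × List (Int × Int)) (p : Int × Int) :
    List (Option Int) × List (Int × Int) :=
  let stack' := pmNsvPop st.2 p.2
  (st.1 ++ [stack'.head?.map (fun q => q.1)], (p.1, p.2) :: stack')

def pmParentIdxs (indents : List Int) : List (Option Int) :=
  ((PySem.List.enumerate indents).foldl pmNsvStep ([], [])).1

-- items = [p for p in map(_accept, lines) if p is not None];
-- parents = _parent_indices([ind for ind, _ in items]); stage 3 = the final comprehension
def parse_mindmap_py_alt (lines : List String) : List (List (String × String)) :=
  let items := (lines.map pmAccept).filterMap id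
  let parents := pmParentIdxs (items.map (fun p => p.1))
  (PySem.List.enumerate (items.zip parents)).map (fun ip =>
    match ip.2.2 with
    | none => [("id", pmNodeId ip.1), ("name", ip.2.1.2)]
    | some p => [("id", pmNodeId ip.1), ("name", ip.2.1.2), ("parent_id", pmNodeId p)])

-- ===== PRECONDITION & SPEC =====
def Spec_parse_mindmap_py (lines : List String) (out : List (List (String × String))) : Prop := out = parse_mindmap_py_alt lines
instance (lines : List String) (out : List (List (String × String))) : Decidable (Spec_parse_mindmap_py lines out) := by unfold Spec_parse_mindmap_py; infer_instance

-- ===== CLAIM =====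
def Claim_equal_parse_mindmap_py : Prop := ∀ (lines : List String), Dom_parse_mindmap_py lines → Spec_parse_mindmap_py lines (parse_mindmap_py lines)

-- ===== LEMMAS AND PROOFS =====

-- proof-side reference form of record i: parent = most recent earlier item with smaller indent
def pmMake (items : List (Int × String)) (i : Int) (indent : Int) (label : String) :
    List (String × String) :=
  match (PySem.List.enumerate (PySem.List.slice items none (some i))).reverse.find?
      (fun jp => decide (jp.2.1 < indent)) with
  | none => [("id", pmNodeId i), ("name", label)]
  | some jp => [("id", pmNodeId i), ("name", label), ("parent_id", pmNodeId jp.1)]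

-- proof-side reference form of parent index i over the indent sequence
def pmPar (indents : List Int) (i : Int) (t : Int) : Option Int :=
  ((PySem.List.enumerate (PySem.List.slice indents none (some i))).reverse.find?
      (fun jp => decide (jp.2 < t))).map (fun jp => jp.1)

-- popping to a lower threshold after a higher one = popping to the lower one directly
theorem pmPop_pmPop (stack : List (Int × String)) (i t : Int) (h : t ≤ i) :
    pmPop (pmPop stack i) t = pmPop stack t := by
  induction stack with
  | nil => rfl
  | cons p rest ih =>
    obtain ⟨j, x⟩ := p
    by_cases hij : i ≤ j
    · have htj : t ≤ j := le_trans h hij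
      simp [pmPop, hij, htj, ih]
    · simp [pmPop, hij]

theorem pmNsvPop_pmNsvPop (stack : List (Int × Int)) (i t : Int) (h : t ≤ i) :
    pmNsvPop (pmNsvPop stack i) t = pmNsvPop stack t := by
  induction stack with
  | nil => rfl
  | cons p rest ih =>
    obtain ⟨j, x⟩ := p
    by_cases hij : i ≤ x
    · have htj : t ≤ x := le_trans h hij
      simp [pmNsvPop, hij, htj, ih]
    · simp [pmNsvPop, hij]

-- A-side invariant: the popped-down stack top is the most recent accepted item of acc with
-- indent strictly below the threshold, carrying pmNodeId of its index
def pmInv (stack : List (Int × String)) (acc : List (Int × String)) : Prop :=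
  ∀ t : Int, (pmPop stack t).head? =
    ((PySem.List.enumerate acc).reverse.find? (fun jp => decide (jp.2.1 < t))).map
      (fun jp => (jp.2.1, pmNodeId jp.1))

theorem pmInv_step (stack : List (Int × String)) (acc : List (Int × String))
    (indent : Int) (lab : String) (h : pmInv stack acc) :
    pmInv ((indent, pmRecId acc.length) :: pmPop stack indent) (acc ++ [(indent, lab)]) := by
  intro t
  have henum : PySem.List.enumerate (acc ++ [(indent, lab)]) =
      PySem.List.enumerate acc ++ [((acc.length : Int), (indent, lab))] := by
    rw [PySem.List.enumerate_append]
    simp [PySem.List.enumerate_cons, PySem.List.enumerate_nil]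
  by_cases hlt : indent < t
  · have : ¬ t ≤ indent := not_le.mpr hlt
    simp [pmPop, henum, this, hlt, pmRecId, pmNodeId]
  · have hle : t ≤ indent := not_lt.mp hlt
    have h' := h t
    simp [pmPop, henum, hle, hlt, pmPop_pmPop stack indent t hle, h']

theorem pm_fold_eq (full : List (Int × String)) (ls : List String)
    (acc : List (Int × String)) (stack : List (Int × String))
    (hfull : full = acc ++ ls.filterMap pmAccept)
    (hinv : pmInv stack acc) :
    (ls.foldl pmStepA
        ((PySem.List.enumerate acc).map (fun ip => pmMake full ip.1 ip.2.1 ip.2.2), stack)).1 =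
      (PySem.List.enumerate full).map (fun ip => pmMake full ip.1 ip.2.1 ip.2.2) := by
  induction ls generalizing acc stack with
  | nil => simp at hfull; simp [hfull]
  | cons line rest ih =>
    simp only [List.foldl_cons]
    by_cases hskip : pmSkip line = true
    · have hstep : ∀ st, pmStepA st line = st := by
        intro st; simp only [pmStepA]; rw [if_pos hskip]
      have hacc : pmAccept line = none := by simp [pmAccept, hskip]
      rw [hstep]
      exact ih acc stack (by simpa [List.filterMap_cons, hacc] using hfull) hinv
    · cases hlab : extract_label_py (PySem.Str.strip line) with
      | none =>
        have hstep : ∀ st, pmStepA st line = st := by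
          intro st; simp only [pmStepA]; rw [if_neg hskip, hlab]; rfl
        have hacc : pmAccept line = none := by simp [pmAccept, hskip, hlab]
        rw [hstep]
        exact ih acc stack (by simpa [List.filterMap_cons, hacc] using hfull) hinv
      | some label =>
        have hacc : pmAccept line = some (pmIndent line, label) := by
          simp [pmAccept, hskip, hlab]
        have hlen : ((PySem.List.enumerate acc).map
            (fun ip => pmMake full ip.1 ip.2.1 ip.2.2)).length = acc.length := by
          simp [PySem.List.length_enumerate]
        have hfull' : full = (acc ++ [(pmIndent line, label)]) ++ rest.filterMap pmAccept := by
          rw [hfull, List.filterMap_cons, hacc, List.append_assoc]; rfl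
        have hnew : pmRecord (pmRecId acc.length) label (pmPop stack (pmIndent line)).head? =
            pmMake full (acc.length : Int) (pmIndent line) label := by
          have hslice : PySem.List.slice full none (some (acc.length : Int)) = acc := by
            rw [PySem.List.slice_to_natCast, hfull', List.append_assoc]
            exact List.take_left' rfl
          rw [hinv (pmIndent line)]
          unfold pmMake
          rw [hslice]
          cases hfind : (PySem.List.enumerate acc).reverse.find?
              (fun jp => decide (jp.2.1 < pmIndent line)) with
          | none => simp [pmRecord, pmRecId, pmNodeId]
          | some jp => simp [pmRecord, pmRecId, pmNodeId]
        have hstep : pmStepA ((PySem.List.enumerate acc).map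
              (fun ip => pmMake full ip.1 ip.2.1 ip.2.2), stack) line =
            ((PySem.List.enumerate acc).map (fun ip => pmMake full ip.1 ip.2.1 ip.2.2) ++
              [pmMake full (acc.length : Int) (pmIndent line) label],
             (pmIndent line, pmRecId acc.length) :: pmPop stack (pmIndent line)) := by
          simp only [pmStepA]
          rw [if_neg hskip, hlab]
          simp only [Option.elim, hlen, hnew]
        rw [hstep]
        have hmap : (PySem.List.enumerate (acc ++ [(pmIndent line, label)])).map
              (fun ip => pmMake full ip.1 ip.2.1 ip.2.2) =
            (PySem.List.enumerate acc).map (fun ip => pmMake full ip.1 ip.2.1 ip.2.2) ++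
              [pmMake full (acc.length : Int) (pmIndent line) label] := by
          rw [PySem.List.enumerate_append]
          simp [PySem.List.enumerate_cons, PySem.List.enumerate_nil]
        rw [← hmap]
        exact ih (acc ++ [(pmIndent line, label)])
          ((pmIndent line, pmRecId acc.length) :: pmPop stack (pmIndent line)) hfull'
          (pmInv_step stack acc (pmIndent line) label hinv)

-- B-side invariant for the nearest-smaller-value stack
def pmNsvInv (stack : List (Int × Int)) (acc : List Int) : Prop :=
  ∀ t : Int, (pmNsvPop stack t).head? =
    (PySem.List.enumerate acc).reverse.find? (fun jp => decide (jp.2 < t))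

theorem pmNsvInv_step (stack : List (Int × Int)) (acc : List Int) (a : Int)
    (h : pmNsvInv stack acc) :
    pmNsvInv (((acc.length : Int), a) :: pmNsvPop stack a) (acc ++ [a]) := by
  intro t
  have henum : PySem.List.enumerate (acc ++ [a]) =
      PySem.List.enumerate acc ++ [((acc.length : Int), a)] := by
    rw [PySem.List.enumerate_append]
    simp [PySem.List.enumerate_cons, PySem.List.enumerate_nil]
  by_cases hlt : a < t
  · have : ¬ t ≤ a := not_le.mpr hlt
    simp [pmNsvPop, henum, this, hlt]
  · have hle : t ≤ a := not_lt.mp hlt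
    have h' := h t
    simp [pmNsvPop, henum, hle, hlt, pmNsvPop_pmNsvPop stack a t hle, h']

theorem nsv_fold_eq (full : List Int) (rest : List Int) (acc : List Int)
    (stack : List (Int × Int)) (hfull : full = acc ++ rest) (hinv : pmNsvInv stack acc) :
    ((PySem.List.enumerate rest (acc.length : Int)).foldl pmNsvStep
        ((PySem.List.enumerate acc).map (fun jp => pmPar full jp.1 jp.2), stack)).1 =
      (PySem.List.enumerate full).map (fun jp => pmPar full jp.1 jp.2) := by
  induction rest generalizing acc stack with
  | nil => simp at hfull; simp [PySem.List.enumerate_nil, hfull]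
  | cons a rest ih =>
    rw [PySem.List.enumerate_cons, List.foldl_cons]
    have hpar : (pmNsvPop stack a).head?.map (fun q => q.1) =
        pmPar full (acc.length : Int) a := by
      have hslice : PySem.List.slice full none (some (acc.length : Int)) = acc := by
        rw [PySem.List.slice_to_natCast, hfull]
        exact List.take_left' rfl
      rw [hinv a]; unfold pmPar; rw [hslice]
    have hstep : pmNsvStep ((PySem.List.enumerate acc).map (fun jp => pmPar full jp.1 jp.2),
          stack) ((acc.length : Int), a) =
        ((PySem.List.enumerate acc).map (fun jp => pmPar full jp.1 jp.2) ++
          [pmPar full (acc.length : Int) a],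
         ((acc.length : Int), a) :: pmNsvPop stack a) := by
      simp only [pmNsvStep, hpar]
    rw [hstep]
    have hmap : (PySem.List.enumerate (acc ++ [a])).map (fun jp => pmPar full jp.1 jp.2) =
        (PySem.List.enumerate acc).map (fun jp => pmPar full jp.1 jp.2) ++
          [pmPar full (acc.length : Int) a] := by
      rw [PySem.List.enumerate_append]
      simp [PySem.List.enumerate_cons, PySem.List.enumerate_nil]
    rw [← hmap]
    have hcast : (acc.length : Int) + 1 = ((acc ++ [a]).length : Int) := by
      simp
    rw [hcast]
    exact ih (acc ++ [a]) (((acc.length : Int), a) :: pmNsvPop stack a)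
      (by rw [hfull, List.append_assoc]; rfl) (pmNsvInv_step stack acc a hinv)

theorem enumerate_map {α β : Type} (f : α → β) (l : List α) (s : Int) :
    PySem.List.enumerate (l.map f) s = (PySem.List.enumerate l s).map (fun jp => (jp.1, f jp.2)) := by
  induction l generalizing s with
  | nil => simp [PySem.List.enumerate_nil]
  | cons x xs ih => simp [PySem.List.enumerate_cons, ih]

-- pmPar over the indent sequence seen at index k equals pmMake's backward search over items
theorem pmPar_map (items : List (Int × String)) (k : Nat) (t : Int) :
    pmPar (items.map (fun p => p.1)) (k : Int) t =
      ((PySem.List.enumerate (PySem.List.slice items none (some (k : Int)))).reverse.find?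
          (fun jp => decide (jp.2.1 < t))).map (fun jp => jp.1) := by
  unfold pmPar
  rw [PySem.List.slice_to_natCast, PySem.List.slice_to_natCast, ← List.map_take,
    enumerate_map, ← List.map_reverse, List.find?_map]
  cases hfind : (PySem.List.enumerate (items.take k)).reverse.find?
      (fun jp => decide (jp.2.1 < t)) with
  | none =>
    have : (PySem.List.enumerate (items.take k)).reverse.find?
        ((fun jp => decide (jp.2 < t)) ∘ (fun jp => (jp.1, jp.2.1))) = none := by
      rw [← hfind]; rfl
    simp [this]
  | some jp =>
    have : (PySem.List.enumerate (items.take k)).reverse.find?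
        ((fun jp => decide (jp.2 < t)) ∘ (fun jp => (jp.1, jp.2.1))) = some jp := by
      rw [← hfind]; rfl
    simp [this]

-- stage 3 of B assembles exactly the reference records
theorem pm_zip_build (items : List (Int × String)) :
    (PySem.List.enumerate (items.zip
        ((PySem.List.enumerate (items.map (fun p => p.1))).map
          (fun jp => pmPar (items.map (fun p => p.1)) jp.1 jp.2)))).map (fun ip =>
      match ip.2.2 with
      | none => [("id", pmNodeId ip.1), ("name", ip.2.1.2)]
      | some p => [("id", pmNodeId ip.1), ("name", ip.2.1.2), ("parent_id", pmNodeId p)]) =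
    (PySem.List.enumerate items).map (fun ip => pmMake items ip.1 ip.2.1 ip.2.2) := by
  apply List.ext_getElem
  · simp [PySem.List.length_enumerate]
  intro k h1 h2
  have hk : k < items.length := by
    simpa [PySem.List.length_enumerate] using h2
  simp only [List.getElem_map, PySem.List.getElem_enumerate, List.getElem_zip]
  simp only [zero_add]
  rw [pmPar_map]
  unfold pmMake
  cases hfind : (PySem.List.enumerate (PySem.List.slice items none (some (k : Int)))).reverse.find?
      (fun jp => decide (jp.2.1 < items[k].1)) with
  | none => simp
  | some jp => simp

-- ===== VERDICT =====
theorem parse_mindmap_py_spec : Claim_equal_parse_mindmap_py := by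
  intro lines _
  unfold Spec_parse_mindmap_py parse_mindmap_py parse_mindmap_py_alt
  simp only [List.filterMap_map, Function.comp_def]
  have hid : (lines.filterMap fun a => id (pmAccept a)) = lines.filterMap pmAccept := rfl
  rw [hid]
  have hA := pm_fold_eq (lines.filterMap pmAccept) lines [] []
    (by simp) (fun t => by simp [pmPop, PySem.List.enumerate_nil])
  have hP : pmParentIdxs ((lines.filterMap pmAccept).map (fun p => p.1)) =
      (PySem.List.enumerate ((lines.filterMap pmAccept).map (fun p => p.1))).map
        (fun jp => pmPar ((lines.filterMap pmAccept).map (fun p => p.1)) jp.1 jp.2) := by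
    have := nsv_fold_eq ((lines.filterMap pmAccept).map (fun p => p.1))
      ((lines.filterMap pmAccept).map (fun p => p.1)) [] [] (by simp)
      (fun t => by simp [pmNsvPop, PySem.List.enumerate_nil])
    simpa [pmParentIdxs, PySem.List.enumerate_nil] using this
  rw [hP, pm_zip_build]
  simpa [PySem.List.enumerate_nil] using hA
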